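-- pv_equiv track=rewrite | github.com/miliar/Code_Jam_Webscraper | solutions_python/Problem_35/318.py | get_sink
-- ===== SOURCE A (Python) =====
-- def get_sink(basin, loc):
-- 	currentHeight = basin[loc[0]][loc[1]]
-- 	neighbors = [(loc[0] - 1, loc[1]),\
-- 			(loc[0], loc[1] - 1),\
-- 			(loc[0], loc[1] + 1),\
-- 			(loc[0] + 1, loc[1])]
-- 	bestN = None
-- 	bestNHeight = currentHeight
-- 	for n in neighbors:
-- 		if 0 <= n[0] < len(basin) and 0 <=n[1] < len(basin[0]):
-- 			if basin[n[0]][n[1]] < bestNHeight: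
-- 				bestN = n
-- 				bestNHeight = basin[n[0]][n[1]]
-- 	if not bestN:
-- 		return loc
-- 	return get_sink(basin, bestN)
-- ===== SOURCE B (Python) =====
-- def get_sink(basin, loc):
--     rows = len(basin)
--     cols = len(basin[0])
--     while True:
--         r, c = loc
--         h = basin[r][c]
--         cands = [(basin[nr][nc], (nr, nc))
--                  for nr, nc in ((r - 1, c), (r, c - 1), (r, c + 1), (r + 1, c))
--                  if 0 <= nr < rows and 0 <= nc < cols and basin[nr][nc] < h]
--         if not cands:
--             return loc
--         loc = min(cands, key=lambda t: t[0])[1]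
-- ===== Notes on version B (the rewrite author's own statement) =====
-- stated objective: idiomatic
-- what changed: Replaces the recursive descent with a best-tracking scan by an iterative while-loop that builds the list of strictly-lower in-bounds neighbors by a comprehension and jumps to the first minimum via min(..., key=...), maintaining the current location explicitly.
-- outside the precondition, e.g. on get_sink([[0, 1], [5]], (0, 0)): A returns (0, 0), B returns (0, 0)
import Mathlib
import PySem

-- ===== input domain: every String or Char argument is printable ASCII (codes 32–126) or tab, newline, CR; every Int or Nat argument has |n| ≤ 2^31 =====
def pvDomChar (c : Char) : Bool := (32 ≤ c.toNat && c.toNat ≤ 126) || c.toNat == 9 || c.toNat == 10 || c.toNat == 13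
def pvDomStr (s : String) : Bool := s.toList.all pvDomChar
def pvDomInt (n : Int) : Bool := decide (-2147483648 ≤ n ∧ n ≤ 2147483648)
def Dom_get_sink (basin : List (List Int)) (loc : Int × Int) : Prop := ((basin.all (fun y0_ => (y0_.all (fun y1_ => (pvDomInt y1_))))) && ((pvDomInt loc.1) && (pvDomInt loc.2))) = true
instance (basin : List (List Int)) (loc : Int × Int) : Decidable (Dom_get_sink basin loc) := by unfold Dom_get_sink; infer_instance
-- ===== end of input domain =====

-- B rewrites the recursive descent as an iterative loop that filters the strictly-lower in-bounds
-- neighbors and jumps to the first minimum (filter + min instead of a best-tracking scan); objective: idiomatic.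

-- ===== PORT A =====
-- basin[i][j] under Python indexing (negative wraps), totalized with 0 where Python raises IndexError
-- (such inputs are excluded by Pre_get_sink); shared by both ports because both Pythons index identically.
def pvCell (basin : List (List Int)) (i j : Int) : Int :=
  ((PySem.List.pyGet? basin i).bind (fun row => PySem.List.pyGet? row j)).getD 0

-- the bounds check '0 <= n[0] < len(basin) and 0 <= n[1] < len(basin[0])' (same test in A and B)
def pvInB (basin : List (List Int)) (n : Int × Int) : Bool :=
  decide (0 ≤ n.1) && decide (n.1 < (basin.length : Int)) &&
  decide (0 ≤ n.2) && decide (n.2 < ((basin.headD []).length : Int))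

-- A's loop body: update (bestN, bestNHeight) on a strictly lower in-bounds neighbor
def pvStep (basin : List (List Int)) (st : Option (Int × Int) × Int) (n : Int × Int) :
    Option (Int × Int) × Int :=
  if pvInB basin n then
    if pvCell basin n.1 n.2 < st.2 then (some n, pvCell basin n.1 n.2) else st
  else st

-- termination measure: number of grid cells strictly below the current height
def pvMeasure (basin : List (List Int)) (h : Int) : Nat :=
  (((Finset.range basin.length) ×ˢ (Finset.range (basin.headD []).length)).filter
    (fun p => pvCell basin (p.1 : Int) (p.2 : Int) < h)).card

lemma pvMeasure_lt (basin : List (List Int)) (b : Int × Int) (h : Int)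
    (hb : pvInB basin b = true) (hlt : pvCell basin b.1 b.2 < h) :
    pvMeasure basin (pvCell basin b.1 b.2) < pvMeasure basin h := by
  have hb' : 0 ≤ b.1 ∧ b.1 < (basin.length : Int) ∧ 0 ≤ b.2 ∧
      b.2 < ((basin.headD []).length : Int) := by
    simpa [pvInB, and_assoc] using hb
  obtain ⟨h1, h2, h3, h4⟩ := hb'
  have hc1 : ((b.1.toNat : Int)) = b.1 := Int.toNat_of_nonneg h1
  have hc2 : ((b.2.toNat : Int)) = b.2 := Int.toNat_of_nonneg h3
  apply Finset.card_lt_card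
  rw [Finset.ssubset_iff_of_subset]
  · refine ⟨(b.1.toNat, b.2.toNat), ?_, ?_⟩
    · simp only [Finset.mem_filter, Finset.mem_product, Finset.mem_range]
      refine ⟨⟨by omega, by omega⟩, ?_⟩
      rw [hc1, hc2]; exact hlt
    · simp only [Finset.mem_filter, not_and]
      intro _
      rw [hc1, hc2]; omega
  · intro p hp
    simp only [Finset.mem_filter] at hp ⊢
    exact ⟨hp.1, by omega⟩

-- fold invariant: any 'some' result of A's scan is an in-bounds neighbor whose height is the
-- accumulator height and strictly below the starting height
lemma pvFold_inv (basin : List (List Int)) (h : Int) :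
    ∀ (l : List (Int × Int)) (st : Option (Int × Int) × Int),
    (∀ b, st.1 = some b → pvInB basin b = true ∧ pvCell basin b.1 b.2 = st.2 ∧ st.2 < h) →
    st.2 ≤ h →
    ∀ b, (l.foldl (pvStep basin) st).1 = some b →
      pvInB basin b = true ∧ pvCell basin b.1 b.2 = (l.foldl (pvStep basin) st).2 ∧
        (l.foldl (pvStep basin) st).2 < h := by
  intro l
  induction l with
  | nil => intro st hinv _ b hb; exact hinv b hb
  | cons n t ih =>
    intro st hinv hle b hb
    simp only [List.foldl_cons] at hb ⊢
    refine ih (pvStep basin st n) ?_ ?_ b hb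
    · intro b' hb'
      unfold pvStep at hb' ⊢
      split_ifs at hb' ⊢ with h1 h2
      · cases hb'; exact ⟨h1, rfl, by omega⟩
      · exact hinv b' hb'
      · exact hinv b' hb'
    · unfold pvStep
      split_ifs with h1 h2
      · omega
      · exact hle
      · exact hle

def get_sink (basin : List (List Int)) (loc : Int × Int) : Int × Int :=
  let currentHeight := pvCell basin loc.1 loc.2
  let neighbors : List (Int × Int) :=
    [(loc.1 - 1, loc.2), (loc.1, loc.2 - 1), (loc.1, loc.2 + 1), (loc.1 + 1, loc.2)]
  let best := neighbors.foldl (pvStep basin) ((none : Option (Int × Int)), currentHeight)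
  match hb : best.1 with
  | none => loc
  | some b => get_sink basin b
termination_by pvMeasure basin (pvCell basin loc.1 loc.2)
decreasing_by
  obtain ⟨hinb, hcell, hlt⟩ :=
    pvFold_inv basin (pvCell basin loc.1 loc.2) _ _ (by intro b' hb'; cases hb') le_rfl b hb
  exact hcell ▸ pvMeasure_lt basin b _ hinb (hcell ▸ hlt)

-- ===== PORT B =====
def get_sink_alt (basin : List (List Int)) (loc : Int × Int) : Int × Int :=
  match hm : PySem.List.min?
      (([(loc.1 - 1, loc.2), (loc.1, loc.2 - 1), (loc.1, loc.2 + 1), (loc.1 + 1, loc.2)].filter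
        (fun n => pvInB basin n && decide (pvCell basin n.1 n.2 < pvCell basin loc.1 loc.2))).map
        (fun n => (pvCell basin n.1 n.2, n))) (fun t => t.1) with
  | none => loc
  | some t => get_sink_alt basin t.2
termination_by pvMeasure basin (pvCell basin loc.1 loc.2)
decreasing_by
  have hmem := PySem.List.min?_mem hm
  simp only [List.mem_map, List.mem_filter, Bool.and_eq_true, decide_eq_true_eq] at hmem
  obtain ⟨n, ⟨-, hinb, hlt⟩, rfl⟩ := hmem
  exact pvMeasure_lt basin n _ hinb hlt

-- ===== PRECONDITION & SPEC =====
-- Pre_ excludes inputs where the Python raises IndexError: the empty basin, an initial loc outside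
-- basin under Python's (negative-wrapping) indexing, and ragged basins with a row shorter than row 0
-- (there whether A raises depends on the heights along the traced path, so the shape is excluded
-- conservatively; B indexes identically and agrees with A wherever A returns on such inputs).
def Pre_get_sink (basin : List (List Int)) (loc : Int × Int) : Prop :=
  basin ≠ [] ∧
  (∀ row ∈ basin, (basin.headD []).length ≤ row.length) ∧
  -(basin.length : Int) ≤ loc.1 ∧ loc.1 < (basin.length : Int) ∧
  -((((PySem.List.pyGet? basin loc.1).getD []).length : Int)) ≤ loc.2 ∧
  loc.2 < ((((PySem.List.pyGet? basin loc.1).getD []).length : Int))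
instance (basin : List (List Int)) (loc : Int × Int) : Decidable (Pre_get_sink basin loc) := by
  unfold Pre_get_sink; infer_instance

def pvWitness_get_sink : List (List Int) × (Int × Int) := ([[3, 1], [2, 0]], (0, 0))

def Spec_get_sink (basin : List (List Int)) (loc : Int × Int) (out : Int × Int) : Prop := out = get_sink_alt basin loc
instance (basin : List (List Int)) (loc : Int × Int) (out : Int × Int) : Decidable (Spec_get_sink basin loc out) := by unfold Spec_get_sink; infer_instance

-- ===== CLAIM (what is proved, stated in full; the proofs are below) =====
def Claim_equal_get_sink : Prop := ∀ (basin : List (List Int)) (loc : Int × Int), Dom_get_sink basin loc → Pre_get_sink basin loc → Spec_get_sink basin loc (get_sink basin loc)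

-- ===== LEMMAS AND PROOFS =====

def pvMinFold (acc : Option (Int × (Int × Int))) (x : Int × (Int × Int)) :
    Option (Int × (Int × Int)) :=
  match acc with
  | none => some x
  | some m => if x.1 < m.1 then some x else some m

lemma pvMinFold_none (x : Int × (Int × Int)) : pvMinFold none x = some x := rfl

lemma pvMinFold_some (m x : Int × (Int × Int)) :
    pvMinFold (some m) x = if x.1 < m.1 then some x else some m := rfl

lemma min?_eq_foldl (xs : List (Int × (Int × Int))) :
    PySem.List.min? xs (fun t => t.1) = xs.foldl pvMinFold none := by
  unfold PySem.List.min?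
  congr 1
  funext acc x
  cases acc <;> rfl

lemma pvGen (basin : List (List Int)) (h : Int) :
    ∀ (l : List (Int × Int)) (o : Option (Int × Int)) (v : Int),
    (o = none → v = h) →
    (∀ b, o = some b → pvCell basin b.1 b.2 = v ∧ v < h) →
    (l.foldl (pvStep basin) (o, v)).1 =
      (List.foldl pvMinFold
        (o.map (fun n => (pvCell basin n.1 n.2, n)))
        ((l.filter (fun n => pvInB basin n && decide (pvCell basin n.1 n.2 < h))).map
          (fun n => (pvCell basin n.1 n.2, n)))).map (fun t => t.2) := by
  intro l
  induction l with
  | nil =>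
    intro o v h1 h2
    cases o <;> simp
  | cons n t ih =>
    intro o v h1 h2
    have hvh : v ≤ h := by
      cases o with
      | none => exact le_of_eq (h1 rfl)
      | some b => exact le_of_lt (h2 b rfl).2
    simp only [List.foldl_cons, List.filter_cons]
    by_cases hI : pvInB basin n = true
    · by_cases hV : pvCell basin n.1 n.2 < v
      · have hC : pvCell basin n.1 n.2 < h := by omega
        have hstep : pvStep basin (o, v) n = (some n, pvCell basin n.1 n.2) := by
          simp [pvStep, hI, hV]
        rw [hstep]
        have hg : (List.foldl pvMinFold
            (o.map (fun n => (pvCell basin n.1 n.2, n)))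
            ((pvCell basin n.1 n.2, n) ::
              (t.filter (fun n => pvInB basin n && decide (pvCell basin n.1 n.2 < h))).map
                (fun n => (pvCell basin n.1 n.2, n)))) =
            (List.foldl pvMinFold
            ((some n).map (fun n => (pvCell basin n.1 n.2, n)))
            ((t.filter (fun n => pvInB basin n && decide (pvCell basin n.1 n.2 < h))).map
                (fun n => (pvCell basin n.1 n.2, n)))) := by
          cases o with
          | none => simp [pvMinFold_none]
          | some b =>
            have := h2 b rfl
            simp only [Option.map_some, List.foldl_cons, pvMinFold_some]
            rw [if_pos (by simpa [this.1] using hV)]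
        simp only [hI, hC, decide_true, Bool.and_self, if_true, List.map_cons]
        rw [hg]
        exact ih (some n) (pvCell basin n.1 n.2) (by intro hx; cases hx)
          (by intro b hb; cases hb; exact ⟨rfl, hC⟩)
      · have hstep : pvStep basin (o, v) n = (o, v) := by
          simp [pvStep, hI, hV]
        rw [hstep]
        cases o with
        | none =>
          have hC : ¬ pvCell basin n.1 n.2 < h := by have := h1 rfl; omega
          simp only [hI, hC, decide_false, Bool.and_false, Bool.false_eq_true, if_false]
          exact ih none v h1 h2
        | some b =>
          by_cases hC : pvCell basin n.1 n.2 < h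
          · simp only [hI, hC, decide_true, Bool.and_self, if_true, List.map_cons]
            have hg : (List.foldl pvMinFold
                ((some b).map (fun n => (pvCell basin n.1 n.2, n)))
                ((pvCell basin n.1 n.2, n) ::
                  (t.filter (fun n => pvInB basin n && decide (pvCell basin n.1 n.2 < h))).map
                    (fun n => (pvCell basin n.1 n.2, n)))) =
                (List.foldl pvMinFold
                ((some b).map (fun n => (pvCell basin n.1 n.2, n)))
                ((t.filter (fun n => pvInB basin n && decide (pvCell basin n.1 n.2 < h))).map
                    (fun n => (pvCell basin n.1 n.2, n)))) := by
              have := h2 b rfl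
              simp only [Option.map_some, List.foldl_cons, pvMinFold_some]
              rw [if_neg (by simpa [this.1] using hV)]
            rw [hg]
            exact ih (some b) v h1 h2
          · simp only [hI, hC, decide_false, Bool.and_false, Bool.false_eq_true, if_false]
            exact ih (some b) v h1 h2
    · have hstep : pvStep basin (o, v) n = (o, v) := by
        simp [pvStep, hI]
      rw [hstep]
      simp only [hI, Bool.false_and, Bool.false_eq_true, if_false]
      exact ih o v h1 h2

lemma pvStep_agree (basin : List (List Int)) (n1 n2 n3 n4 : Int × Int) (h : Int) :
    ([n1, n2, n3, n4].foldl (pvStep basin) ((none : Option (Int × Int)), h)).1 =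
      (PySem.List.min?
        (([n1, n2, n3, n4].filter
          (fun n => pvInB basin n && decide (pvCell basin n.1 n.2 < h))).map
          (fun n => (pvCell basin n.1 n.2, n))) (fun t => t.1)).map (fun t => t.2) := by
  have := pvGen basin h [n1, n2, n3, n4] none h (fun _ => rfl) (by intro b hb; cases hb)
  simp only [Option.map_none] at this
  rw [min?_eq_foldl]
  exact this

lemma get_sink_eq (basin : List (List Int)) (loc : Int × Int) :
    get_sink basin loc = get_sink_alt basin loc := by
  have H : ∀ k (loc : Int × Int), pvMeasure basin (pvCell basin loc.1 loc.2) < k →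
      get_sink basin loc = get_sink_alt basin loc := by
    intro k
    induction k with
    | zero => intro loc hk; omega
    | succ k ih =>
      intro loc hk
      have hstep := pvStep_agree basin (loc.1 - 1, loc.2) (loc.1, loc.2 - 1) (loc.1, loc.2 + 1)
        (loc.1 + 1, loc.2) (pvCell basin loc.1 loc.2)
      rw [get_sink, get_sink_alt]
      simp only [List.foldl] at hstep
      split
      · rename_i heqA
        simp only [List.foldl] at heqA
        rw [heqA] at hstep
        split
        · rfl
        · rename_i t heqB
          rw [heqB] at hstep
          simp at hstep
      · rename_i b heqA
        simp only [List.foldl] at heqA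
        rw [heqA] at hstep
        split
        · rename_i heqB
          rw [heqB] at hstep
          simp at hstep
        · rename_i t heqB
          rw [heqB] at hstep
          simp only [Option.map_some, Option.some.injEq] at hstep
          rw [hstep]
          apply ih
          have hmem := PySem.List.min?_mem heqB
          simp only [List.mem_map, List.mem_filter, Bool.and_eq_true, decide_eq_true_eq] at hmem
          obtain ⟨n, ⟨-, hinb, hlt⟩, rfl⟩ := hmem
          show pvMeasure basin (pvCell basin n.1 n.2) < k
          have := pvMeasure_lt basin n _ hinb hlt
          omega
  exact H (pvMeasure basin (pvCell basin loc.1 loc.2) + 1) loc (by omega)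

-- ===== VERDICT (by name: the statement is the Claim_ definition above) =====
theorem get_sink_spec : Claim_equal_get_sink := by
  intro basin loc _ _
  unfold Spec_get_sink
  exact get_sink_eq basin loc
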